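-- pv_equiv track=rewrite | github.com/Conrad-X/text2SQL | server/utilities/format_schema.py | remove_errors_from_linked_schema
-- ===== SOURCE A (Python) =====
-- from typing import Dict, List, Optional, Union
--
-- def remove_errors_from_linked_schema(linked_schema: Dict[str, List], schema_dict: Dict[str, List]) -> Dict[str, List]:
--     """
--     Removes columns and tables in the linked schema that do not exist in the DB.
--     The comparison is case-insensitive.
--
--     Parameters:
--     linked_schema (Dict[str, List]): A dictionary where keys are table names and
--                                     values are lists of column names.
--     schema_dict (Dict[str, List]): A dictionary where keys are table names and
--                                    values are lists of column names.
--
--     Returns: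
--     Dict[str, List]: A corrected linked schema where only valid tables and columns
--                      are retained. The keys and values are in the same case as
--                      the original linked schema.
--     """
--
--     lowered_schema_dict = {
--         table.lower(): [column.lower() for column in schema_dict[table]]
--         for table in schema_dict.keys()
--     }
--
--     corrected_linked_schema = {}
--     for table in linked_schema.keys():
--         if table.lower() in lowered_schema_dict:
--             corrected_linked_schema[table] = []
--             for column in linked_schema[table]:
--                 if column.lower() in lowered_schema_dict[table.lower()]:
--                     corrected_linked_schema[table].append(column)
--
--     return corrected_linked_schema
-- ===== SOURCE B (Python) =====
-- def remove_errors_from_linked_schema(linked_schema, schema_dict):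
--     """For each linked table, look up the DB table case-insensitively on the
--     fly and keep only its columns that exist there (also case-insensitively)."""
--     result = {}
--     for table, columns in linked_schema.items():
--         db_cols = next((cols for name, cols in schema_dict.items()
--                         if name.lower() == table.lower()), None)
--         if db_cols is not None:
--             db_lower = [c.lower() for c in db_cols]
--             result[table] = [c for c in columns if c.lower() in db_lower]
--     return result
-- ===== Notes on version B (the rewrite author's own statement) =====
-- stated objective: alternative
-- what changed: B drops A's precomputed lowered_schema_dict index: for each linked table it finds the DB table by a first-match case-insensitive scan of schema_dict (next over a generator) and filters the columns against that table's lowered column list; Pre_ excludes schema_dicts with two keys equal up to case, where A's last-wins dict-comprehension overwrite vs B's first match is an accidental tie-break.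
-- outside the precondition, e.g. on remove_errors_from_linked_schema({'t': ['x']}, {'T': ['x'], 't': []}): A returns {'t': []}, B returns {'t': ['x']}
import Mathlib
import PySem

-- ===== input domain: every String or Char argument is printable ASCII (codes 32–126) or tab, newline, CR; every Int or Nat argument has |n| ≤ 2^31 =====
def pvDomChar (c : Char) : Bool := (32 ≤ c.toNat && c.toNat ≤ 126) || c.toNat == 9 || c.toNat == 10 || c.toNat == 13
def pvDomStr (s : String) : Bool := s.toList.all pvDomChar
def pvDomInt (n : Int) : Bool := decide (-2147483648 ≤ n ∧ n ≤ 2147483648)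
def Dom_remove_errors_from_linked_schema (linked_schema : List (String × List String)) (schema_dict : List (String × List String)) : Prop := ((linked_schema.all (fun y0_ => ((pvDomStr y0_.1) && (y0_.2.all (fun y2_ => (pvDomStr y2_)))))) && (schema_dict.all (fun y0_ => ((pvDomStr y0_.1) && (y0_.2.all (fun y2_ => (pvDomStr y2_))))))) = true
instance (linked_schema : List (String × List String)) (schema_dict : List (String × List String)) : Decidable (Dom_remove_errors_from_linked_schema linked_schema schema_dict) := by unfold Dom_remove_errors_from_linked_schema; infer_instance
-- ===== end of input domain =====

-- B removes A's precomputed lowered index: per linked table it finds the DB table by a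
-- first-match case-insensitive scan and filters columns on the fly — alternative decomposition, not faster.


-- ===== PORT A =====
-- literal transliteration of A: build lowered_schema_dict, then the filtered result dict
def remove_errors_from_linked_schema (linked_schema : List (String × List String)) (schema_dict : List (String × List String)) : List (String × List String) :=
  let ls : PySem.Dict String (List String) := PySem.Dict.ofList linked_schema
  let sd : PySem.Dict String (List String) := PySem.Dict.ofList schema_dict
  let lowered : PySem.Dict String (List String) :=
    (PySem.Dict.keys sd).foldl
      (fun d t => PySem.Dict.insert d (PySem.Str.lower t)
        ((PySem.Dict.getD sd t []).map PySem.Str.lower))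
      PySem.Dict.empty
  let corrected : PySem.Dict String (List String) :=
    (PySem.Dict.keys ls).foldl
      (fun d t =>
        if PySem.Dict.contains lowered (PySem.Str.lower t) then
          (PySem.Dict.getD ls t []).foldl
            (fun d column =>
              if (PySem.Dict.getD lowered (PySem.Str.lower t) []).contains (PySem.Str.lower column) then
                PySem.Dict.modify d t [] (fun l => l ++ [column])
              else d)
            (PySem.Dict.insert d t [])
        else d)
      PySem.Dict.empty
  corrected.items

-- ===== PORT B =====
-- B's lookup: next((cols for name, cols in schema_dict.items() if name.lower() == tl), None)
def pvFindTable (pairs : List (String × List String)) (tl : String) : Option (List String) :=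
  (pairs.find? (fun p => PySem.Str.lower p.1 == tl)).map (·.2)

def remove_errors_from_linked_schema_alt (linked_schema : List (String × List String)) (schema_dict : List (String × List String)) : List (String × List String) :=
  (PySem.Dict.ofList linked_schema).items.foldl
    (fun out p =>
      match pvFindTable (PySem.Dict.ofList schema_dict).items (PySem.Str.lower p.1) with
      | none => out
      | some cs =>
          let dbLower := cs.map PySem.Str.lower
          out ++ [(p.1, p.2.filter (fun c => dbLower.contains (PySem.Str.lower c)))])
    []

-- ===== PRECONDITION & SPEC =====
-- Pre_ excludes schema dicts with two keys equal up to case: which case-variant's columns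
-- A consults there is an accident of its last-wins dict-comprehension overwrite, while B
-- naturally takes the first case-insensitive match; either choice is defensible.
def Pre_remove_errors_from_linked_schema (linked_schema : List (String × List String)) (schema_dict : List (String × List String)) : Prop :=
  (((PySem.Dict.ofList schema_dict).keys.map PySem.Str.lower).Nodup)
instance (linked_schema : List (String × List String)) (schema_dict : List (String × List String)) : Decidable (Pre_remove_errors_from_linked_schema linked_schema schema_dict) := by unfold Pre_remove_errors_from_linked_schema; infer_instance

def pvWitness_remove_errors_from_linked_schema : (List (String × List String)) × (List (String × List String)) :=
  ([("Emp", ["Id", "nameX"]), ("gone", ["x"])], [("emp", ["id", "Name"]), ("Dept", ["id"])])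

def Spec_remove_errors_from_linked_schema (linked_schema : List (String × List String)) (schema_dict : List (String × List String)) (out : List (String × List String)) : Prop := out = remove_errors_from_linked_schema_alt linked_schema schema_dict
instance (linked_schema : List (String × List String)) (schema_dict : List (String × List String)) (out : List (String × List String)) : Decidable (Spec_remove_errors_from_linked_schema linked_schema schema_dict out) := by unfold Spec_remove_errors_from_linked_schema; infer_instance

-- ===== CLAIM (what is proved, stated in full; the proofs are below) =====
def Claim_equal_remove_errors_from_linked_schema : Prop := ∀ (linked_schema : List (String × List String)) (schema_dict : List (String × List String)), Dom_remove_errors_from_linked_schema linked_schema schema_dict → Pre_remove_errors_from_linked_schema linked_schema schema_dict → Spec_remove_errors_from_linked_schema linked_schema schema_dict (remove_errors_from_linked_schema linked_schema schema_dict)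

-- ===== LEMMAS AND PROOFS =====

-- the lowered-index lookup is the last-match scan over the same items, values lowered
theorem pv_lookup_foldl_insert (l : List (String × List String)) (d : PySem.Dict String (List String)) (k : String) :
    PySem.Dict.get? (l.foldl (fun d p => PySem.Dict.insert d (PySem.Str.lower p.1) ((p.2).map PySem.Str.lower)) d) k
      = l.foldl (fun acc p => if PySem.Str.lower p.1 == k then some ((p.2).map PySem.Str.lower) else acc) (PySem.Dict.get? d k) := by
  induction l generalizing d with
  | nil => rfl
  | cons p t ih =>
      simp only [List.foldl_cons, ih, PySem.Dict.get?_insert]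
      by_cases h : k = PySem.Str.lower p.1
      · simp [h]
      · have : (PySem.Str.lower p.1 == k) = false := by
          rw [beq_eq_false_iff_ne]; exact fun hh => h hh.symm
        simp [h, this]

-- the last-match scan with lowered values is the plain scan, mapped
theorem pv_scan_map (l : List (String × List String)) (k : String) (o : Option (List String)) :
    l.foldl (fun acc p => if PySem.Str.lower p.1 == k then some ((p.2).map PySem.Str.lower) else acc) (o.map (List.map PySem.Str.lower))
      = (l.foldl (fun acc p => if PySem.Str.lower p.1 == k then some p.2 else acc) o).map (List.map PySem.Str.lower) := by
  induction l generalizing o with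
  | nil => rfl
  | cons p t ih =>
      simp only [List.foldl_cons]
      by_cases h : PySem.Str.lower p.1 == k
      · simp only [h]
        exact ih (some p.2)
      · simp only [h]
        exact ih o

-- a scan with no matching element keeps its accumulator
theorem pv_scan_keep (l : List (String × List String)) (k : String) (acc : Option (List String))
    (h : ∀ p ∈ l, (PySem.Str.lower p.1 == k) = false) :
    l.foldl (fun acc p => if PySem.Str.lower p.1 == k then some p.2 else acc) acc = acc := by
  induction l generalizing acc with
  | nil => rfl
  | cons p t ih =>
      simp only [List.foldl_cons, h p (List.mem_cons_self ..)]
      exact ih acc (fun q hq => h q (List.mem_cons_of_mem _ hq))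

-- with pairwise-distinct lowered keys, the last-match scan is the first match
theorem pv_last_eq_find (l : List (String × List String)) (k : String)
    (hnd : (l.map (fun p => PySem.Str.lower p.1)).Nodup) :
    l.foldl (fun acc p => if PySem.Str.lower p.1 == k then some p.2 else acc) none
      = (l.find? (fun p => PySem.Str.lower p.1 == k)).map (·.2) := by
  induction l with
  | nil => rfl
  | cons p t ih =>
      simp only [List.map_cons, List.nodup_cons] at hnd
      simp only [List.foldl_cons, List.find?_cons]
      by_cases h : PySem.Str.lower p.1 == k
      · simp only [h, if_true]
        have hk : PySem.Str.lower p.1 = k := by exact_mod_cast beq_iff_eq.mp h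
        rw [pv_scan_keep t k (some p.2) (fun q hq => by
          rw [beq_eq_false_iff_ne]
          intro he
          exact hnd.1 (by rw [hk, ← he]; exact List.mem_map_of_mem hq))]
        rfl
      · have hb : (PySem.Str.lower p.1 == k) = false := by simpa using h
        rw [if_neg h, ih hnd.2]
        simp [hb]

-- A's inner column loop, started right after 'corrected[table] = []', is one insert of the filtered list
theorem pv_inner (cols : List String) (p : String → Bool) (d : PySem.Dict String (List String)) (t : String) (acc : List String) :
    cols.foldl (fun d c => if p c then PySem.Dict.modify d t [] (fun l => l ++ [c]) else d) (PySem.Dict.insert d t acc)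
      = PySem.Dict.insert d t (acc ++ cols.filter p) := by
  induction cols generalizing acc with
  | nil => simp
  | cons c cs ih =>
      simp only [List.foldl_cons, List.filter_cons]
      by_cases h : p c
      · have hmod : PySem.Dict.modify (PySem.Dict.insert d t acc) t [] (fun l => l ++ [c])
            = PySem.Dict.insert d t (acc ++ [c]) := by
          simp [PySem.Dict.modify, PySem.Dict.getD_insert_self, PySem.Dict.insert_insert_self]
        simp [h, hmod, ih (acc ++ [c])]
      · simp [h, ih acc]

-- B's list accumulator loop only appends, so the initial segment factors out
theorem pv_out_factor (F : String × List String → Option (List String))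
    (g : String × List String → List String → String × List String)
    (l : List (String × List String)) (init : List (String × List String)) :
    l.foldl (fun out p => match F p with | none => out | some cs => out ++ [g p cs]) init
      = init ++ l.foldl (fun out p => match F p with | none => out | some cs => out ++ [g p cs]) [] := by
  induction l generalizing init with
  | nil => simp
  | cons p t ih =>
      simp only [List.foldl_cons]
      cases F p with
      | none => exact ih init
      | some cs =>
          rw [ih (init ++ [g p cs]), ih ([] ++ [g p cs])]
          simp

-- the dict built by A's outer loop over fresh distinct keys has exactly B's list as items
theorem pv_outer (F : String × List String → Option (List String))
    (g : String × List String → List String → List String)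
    (items : List (String × List String)) (d : PySem.Dict String (List String))
    (hfresh : ∀ p ∈ items, PySem.Dict.contains d p.1 = false)
    (hnd : (items.map (·.1)).Nodup) :
    (items.foldl (fun d p => match F p with | none => d | some cs => PySem.Dict.insert d p.1 (g p cs)) d).items
      = d.items ++ items.foldl (fun out p => match F p with | none => out | some cs => out ++ [(p.1, g p cs)]) [] := by
  induction items generalizing d with
  | nil => simp
  | cons p t ih =>
      simp only [List.foldl_cons, List.map_cons, List.nodup_cons] at hnd ⊢
      cases hF : F p with
      | none =>
          exact ih d (fun q hq => hfresh q (List.mem_cons_of_mem _ hq)) hnd.2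
      | some cs =>
          simp only [List.nil_append]
          have hc : PySem.Dict.contains d p.1 = false := hfresh p (List.mem_cons_self ..)
          have hfresh' : ∀ q ∈ t, PySem.Dict.contains (PySem.Dict.insert d p.1 (g p cs)) q.1 = false := by
            intro q hq
            rw [PySem.Dict.contains_insert]
            have h1 : (q.1 == p.1) = false := by
              rw [beq_eq_false_iff_ne]
              intro he
              exact hnd.1 (he ▸ List.mem_map_of_mem hq)
            rw [h1, hfresh q (List.mem_cons_of_mem _ hq)]
            rfl
          rw [ih _ hfresh' hnd.2]
          rw [pv_out_factor F (fun p cs => (p.1, g p cs)) t [(p.1, g p cs)]]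
          simp [PySem.Dict.items_insert, hc]

-- ===== VERDICT (by name: the statement is the Claim_ definition above) =====
theorem remove_errors_from_linked_schema_spec : Claim_equal_remove_errors_from_linked_schema := by
  intro linked_schema schema_dict _ hpre
  unfold Spec_remove_errors_from_linked_schema
  simp only [remove_errors_from_linked_schema, remove_errors_from_linked_schema_alt]
  have hnodsd := PySem.Dict.nodup_keys_ofList (κ := String) (ν := List String) schema_dict
  have hnodls := PySem.Dict.nodup_keys_ofList (κ := String) (ν := List String) linked_schema
  -- A's lowered-index comprehension over keys is the same fold over items
  have hlow :
      (PySem.Dict.keys (PySem.Dict.ofList schema_dict)).foldl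
        (fun d t => PySem.Dict.insert d (PySem.Str.lower t)
          ((PySem.Dict.getD (PySem.Dict.ofList schema_dict) t []).map PySem.Str.lower))
        PySem.Dict.empty
      = (PySem.Dict.ofList schema_dict).items.foldl
          (fun d p => PySem.Dict.insert d (PySem.Str.lower p.1) ((p.2).map PySem.Str.lower))
          PySem.Dict.empty := by
    conv_rhs => rw [PySem.Dict.items_eq_map_keys _ hnodsd [], List.foldl_map]
  rw [hlow]
  set L := (PySem.Dict.ofList schema_dict).items.foldl
      (fun d p => PySem.Dict.insert d (PySem.Str.lower p.1) ((p.2).map PySem.Str.lower))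
      PySem.Dict.empty with hLdef
  have hndlow : ((PySem.Dict.ofList schema_dict).items.map (fun p => PySem.Str.lower p.1)).Nodup := by
    have := hpre
    unfold Pre_remove_errors_from_linked_schema at this
    simpa [PySem.Dict.keys, Function.comp] using this
  have hget : ∀ k, PySem.Dict.get? L k
      = (pvFindTable (PySem.Dict.ofList schema_dict).items k).map (List.map PySem.Str.lower) := by
    intro k
    rw [hLdef, pv_lookup_foldl_insert, PySem.Dict.get?_empty]
    have h1 := pv_scan_map (PySem.Dict.ofList schema_dict).items k none
    simp only [Option.map_none] at h1
    rw [h1, pv_last_eq_find _ k hndlow]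
    simp [pvFindTable, Option.map_map, Function.comp]
  -- A's outer loop over keys is the same fold over items
  have houter :
      (PySem.Dict.keys (PySem.Dict.ofList linked_schema)).foldl
        (fun d t =>
          if PySem.Dict.contains L (PySem.Str.lower t) then
            (PySem.Dict.getD (PySem.Dict.ofList linked_schema) t []).foldl
              (fun d column =>
                if (PySem.Dict.getD L (PySem.Str.lower t) []).contains (PySem.Str.lower column) then
                  PySem.Dict.modify d t [] (fun l => l ++ [column])
                else d)
              (PySem.Dict.insert d t [])
          else d)
        PySem.Dict.empty
      = (PySem.Dict.ofList linked_schema).items.foldl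
          (fun d p =>
            if PySem.Dict.contains L (PySem.Str.lower p.1) then
              (p.2).foldl
                (fun d column =>
                  if (PySem.Dict.getD L (PySem.Str.lower p.1) []).contains (PySem.Str.lower column) then
                    PySem.Dict.modify d p.1 [] (fun l => l ++ [column])
                  else d)
                (PySem.Dict.insert d p.1 [])
            else d)
          PySem.Dict.empty := by
    conv_rhs => rw [PySem.Dict.items_eq_map_keys _ hnodls [], List.foldl_map]
  rw [houter]
  -- each outer step is: no match → skip; first match cs → one insert of the filtered columns
  have hstep : ∀ (d : PySem.Dict String (List String)) (p : String × List String),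
      (if PySem.Dict.contains L (PySem.Str.lower p.1) then
        (p.2).foldl
          (fun d column =>
            if (PySem.Dict.getD L (PySem.Str.lower p.1) []).contains (PySem.Str.lower column) then
              PySem.Dict.modify d p.1 [] (fun l => l ++ [column])
            else d)
          (PySem.Dict.insert d p.1 [])
      else d)
      = (match pvFindTable (PySem.Dict.ofList schema_dict).items (PySem.Str.lower p.1) with
         | none => d
         | some cs => PySem.Dict.insert d p.1
             ((p.2).filter (fun c => (cs.map PySem.Str.lower).contains (PySem.Str.lower c)))) := by
    intro d p
    cases hcs : pvFindTable (PySem.Dict.ofList schema_dict).items (PySem.Str.lower p.1) with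
    | none =>
        have hc : PySem.Dict.contains L (PySem.Str.lower p.1) = false := by
          rw [PySem.Dict.contains_eq_isSome_get?, hget, hcs]; rfl
        simp [hc]
    | some cs =>
        have hc : PySem.Dict.contains L (PySem.Str.lower p.1) = true := by
          rw [PySem.Dict.contains_eq_isSome_get?, hget, hcs]; rfl
        have hgd : PySem.Dict.getD L (PySem.Str.lower p.1) [] = cs.map PySem.Str.lower := by
          rw [PySem.Dict.getD_eq_get?_getD, hget, hcs]; rfl
        simp only [hc, if_true, hgd]
        rw [pv_inner]
        simp
  rw [PySem.List.foldl_congr_mem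
        (PySem.Dict.ofList linked_schema).items
        (fun d p =>
          if PySem.Dict.contains L (PySem.Str.lower p.1) then
            (p.2).foldl
              (fun d column =>
                if (PySem.Dict.getD L (PySem.Str.lower p.1) []).contains (PySem.Str.lower column) then
                  PySem.Dict.modify d p.1 [] (fun l => l ++ [column])
                else d)
              (PySem.Dict.insert d p.1 [])
          else d)
        (fun d p =>
          match pvFindTable (PySem.Dict.ofList schema_dict).items (PySem.Str.lower p.1) with
          | none => d
          | some cs => PySem.Dict.insert d p.1
              ((p.2).filter (fun c => (cs.map PySem.Str.lower).contains (PySem.Str.lower c))))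
        PySem.Dict.empty
        (fun d p _ => hstep d p)]
  rw [pv_outer (fun p => pvFindTable (PySem.Dict.ofList schema_dict).items (PySem.Str.lower p.1))
        (fun p cs => (p.2).filter (fun c => (cs.map PySem.Str.lower).contains (PySem.Str.lower c)))
        (PySem.Dict.ofList linked_schema).items PySem.Dict.empty
        (fun q _ => by simp)
        (by simpa [PySem.Dict.keys] using hnodls)]
  simp
  rfl
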